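-- pv_equiv track=rewrite | github.com/sieukim/algorithm-programmers | level3/ex15.py | solution
-- ===== SOURCE A (Python) =====
-- def solution(board, skill):
--     # type 1
--     def attack(r1, c1, r2, c2, degree):
--         cumSum[r1][c1] -= degree
--         cumSum[r2+1][c2+1] -= degree
--         cumSum[r1][c2+1] += degree
--         cumSum[r2+1][c1] += degree
--
--     # type 2
--     def recover(r1, c1, r2, c2, degree):
--         cumSum[r1][c1] += degree
--         cumSum[r2+1][c2+1] += degree
--         cumSum[r1][c2+1] -= degree
--         cumSum[r2+1][c1] -= degree
--
--     # 행렬 크기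
--     n, m = len(board), len(board[0])
--     # 누적 합 리스트 cumSum[i][j]: (0, 0) ~ (i, j) 사이의 변화값
--     cumSum = [[0] * (m+1) for _ in range(n+1)]
--
--     for type, r1, c1, r2, c2, degree in skill:
--         if type == 1:
--             attack(r1, c1, r2, c2, degree)
--         elif type == 2:
--             recover(r1, c1, r2, c2, degree)
--
--     # 가로 방향 누적합
--     for i in range(n):
--         for j in range(1, m):
--             cumSum[i][j] += cumSum[i][j-1]
--
--     # 세로 방향 누적합
--     for i in range(1, n):
--         for j in range(m):
--             cumSum[i][j] += cumSum[i-1][j]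
--
--     # 내구도 확인
--     answer = 0
--
--     for i in range(n):
--         for j in range(m):
--             if board[i][j] + cumSum[i][j] > 0:
--                 answer += 1
--
--     return answer
-- ===== SOURCE B (Python) =====
-- def solution(board, skill):
--     n, m = len(board), len(board[0])
--     answer = 0
--     for i in range(n):
--         for j in range(m):
--             h = board[i][j]
--             for t, r1, c1, r2, c2, d in skill:
--                 if r1 <= i <= r2 and c1 <= j <= c2:
--                     if t == 1:
--                         h -= d
--                     elif t == 2:
--                         h += d
--             if h > 0:
--                 answer += 1
--     return answer
-- ===== Notes on version B (the rewrite author's own statement) =====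
-- stated objective: simpler
-- what changed: B drops A's 2D difference-array / prefix-sum machinery entirely and, for each cell, directly scans the skill list accumulating +/-degree for the rectangles covering it, counting cells left positive; Pre_ excludes skill rows whose type-1/2 rectangle has coordinates outside the board or out of order (r1 > r2 / c1 > c2): such calls lie outside the function's input contract, A raises IndexError on most of them, and where both programs still return, neither value is specified and each is as defensible as the other.
-- outside the precondition, e.g. on solution([[0]], [[1, -1, 0, -1, 0, 5]]): A returns 1, B returns 0; on solution([[1], [1], [1]], [[2, 2, 0, 0, 0, 5]]): A returns 2, B returns 3
import Mathlib
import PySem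

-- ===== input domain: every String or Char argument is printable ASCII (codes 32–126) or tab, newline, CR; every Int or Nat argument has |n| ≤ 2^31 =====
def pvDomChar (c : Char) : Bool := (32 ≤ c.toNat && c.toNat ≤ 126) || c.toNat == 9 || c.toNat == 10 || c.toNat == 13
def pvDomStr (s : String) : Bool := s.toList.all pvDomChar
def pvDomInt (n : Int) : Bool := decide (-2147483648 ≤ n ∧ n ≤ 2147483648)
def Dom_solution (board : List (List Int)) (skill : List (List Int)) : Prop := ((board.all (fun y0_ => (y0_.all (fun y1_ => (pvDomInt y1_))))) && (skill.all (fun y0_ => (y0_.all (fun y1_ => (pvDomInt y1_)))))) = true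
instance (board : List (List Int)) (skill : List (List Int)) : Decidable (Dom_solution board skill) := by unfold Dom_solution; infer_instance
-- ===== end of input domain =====

-- B replaces A's 2D difference-array + prefix-sum table by a direct per-cell scan of the
-- skill list (simpler: no mutable table, no prefix passes); return values agree on Pre_.

-- ===== PORT A =====

-- Python `xs[i] = f(xs[i])` on a list, including negative-index wraparound; where Python
-- would raise IndexError (index out of range) this returns xs unchanged — such inputs are
-- excluded by Pre_solution.
def pyModAt {α : Type} (xs : List α) (i : Int) (f : α → α) : List α :=
  let k : Int := if i < 0 then i + xs.length else i
  if 0 ≤ k ∧ k < xs.length then xs.modify k.toNat f else xs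

-- cumSum[i][j] = f(cumSum[i][j])
def upd2 (C : List (List Int)) (i j : Int) (f : Int → Int) : List (List Int) :=
  pyModAt C i (fun row => pyModAt row j f)

-- grid read with Nat indices (all reads in A use loop counters, which are ≥ 0)
def g (C : List (List Int)) (i j : Nat) : Int := (C.getD i []).getD j 0

-- one iteration of A's `for type, r1, c1, r2, c2, degree in skill` loop
def applySkill (C : List (List Int)) (s : List Int) : List (List Int) :=
  match s with
  | [t, r1, c1, r2, c2, d] =>
    if t = 1 then
      upd2 (upd2 (upd2 (upd2 C r1 c1 (· - d)) (r2+1) (c2+1) (· - d)) r1 (c2+1) (· + d)) (r2+1) c1 (· + d)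
    else if t = 2 then
      upd2 (upd2 (upd2 (upd2 C r1 c1 (· + d)) (r2+1) (c2+1) (· + d)) r1 (c2+1) (· - d)) (r2+1) c1 (· - d)
    else C
  | _ => C

def solution (board : List (List Int)) (skill : List (List Int)) : Int :=
  let n := board.length
  let m := (board.headD []).length
  let cum0 := List.replicate (n+1) (List.replicate (m+1) (0:Int))
  let cum1 := skill.foldl applySkill cum0
  let cum2 := (List.range n).foldl (fun C (i : Nat) =>
      (List.range' 1 (m-1)).foldl (fun C (j : Nat) => upd2 C (i:Int) (j:Int) (fun x => x + g C i (j-1))) C) cum1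
  let cum3 := (List.range' 1 (n-1)).foldl (fun C (i : Nat) =>
      (List.range m).foldl (fun C (j : Nat) => upd2 C (i:Int) (j:Int) (fun x => x + g C (i-1) j)) C) cum2
  (List.range n).foldl (fun a i =>
    (List.range m).foldl (fun a j =>
      if g board i j + g cum3 i j > 0 then a + 1 else a) a) 0

-- ===== PORT B =====

-- one iteration of B's inner `for t, r1, c1, r2, c2, d in skill` loop on the durability h
def skillStep (i j : Nat) (h : Int) (s : List Int) : Int :=
  match s with
  | [t, r1, c1, r2, c2, d] =>
    if r1 ≤ (i:Int) ∧ (i:Int) ≤ r2 ∧ c1 ≤ (j:Int) ∧ (j:Int) ≤ c2 then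
      if t = 1 then h - d else if t = 2 then h + d else h
    else h
  | _ => h

def solution_alt (board : List (List Int)) (skill : List (List Int)) : Int :=
  let n := board.length
  let m := (board.headD []).length
  (List.range n).foldl (fun a i =>
    (List.range m).foldl (fun a j =>
      let h := skill.foldl (skillStep i j) ((board.getD i []).getD j 0)
      if h > 0 then a + 1 else a) a) 0

-- ===== PRECONDITION & SPEC =====
-- Pre_ requires a nonempty board whose rows are at least as long as row 0 (else A raises
-- IndexError), and skill rows of length exactly 6 (else unpacking raises) whose rectangle,
-- when the type is 1 or 2, satisfies 0 ≤ r1 ≤ r2 < n and 0 ≤ c1 ≤ c2 < m: outside those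
-- bounds the call lies outside the function's input contract: A raises IndexError on
-- most of them, and where both programs still return, neither value is specified and
-- each is as defensible as the other.
def Pre_solution (board : List (List Int)) (skill : List (List Int)) : Prop :=
  board ≠ [] ∧
  (∀ row ∈ board, (board.headD []).length ≤ row.length) ∧
  (∀ s ∈ skill, s.length = 6 ∧
    ((s.getD 0 0 = 1 ∨ s.getD 0 0 = 2) →
      0 ≤ s.getD 1 0 ∧ s.getD 1 0 ≤ s.getD 3 0 ∧ s.getD 3 0 < (board.length : Int) ∧
      0 ≤ s.getD 2 0 ∧ s.getD 2 0 ≤ s.getD 4 0 ∧ s.getD 4 0 < ((board.headD []).length : Int)))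

instance (board : List (List Int)) (skill : List (List Int)) : Decidable (Pre_solution board skill) := by
  unfold Pre_solution; infer_instance

def pvWitness_solution : List (List Int) × List (List Int) := ([[1, 0], [0, 2]], [[1, 0, 0, 1, 1, 1], [2, 0, 0, 0, 1, 3]])

def Spec_solution (board : List (List Int)) (skill : List (List Int)) (out : Int) : Prop := out = solution_alt board skill
instance (board : List (List Int)) (skill : List (List Int)) (out : Int) : Decidable (Spec_solution board skill out) := by unfold Spec_solution; infer_instance

-- ===== CLAIM (what is proved, stated in full; the proofs are below) =====
def Claim_equal_solution : Prop := ∀ (board : List (List Int)) (skill : List (List Int)), Dom_solution board skill → Pre_solution board skill → Spec_solution board skill (solution board skill)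


-- ===== LEMMAS AND PROOFS =====

-- proof-only helpers ------------------------------------------------------

def Shape (n m : Nat) (C : List (List Int)) : Prop :=
  C.length = n ∧ ∀ i : Nat, i < n → (C.getD i []).length = m

-- contribution of one skill row to A's raw difference array at cell (i, j)
def cornerS (s : List Int) (i j : Nat) : Int :=
  match s with
  | [t, r1, c1, r2, c2, d] =>
    (if t = 1 then -d else if t = 2 then d else 0) *
    ((if (i:Int) = r1 then 1 else 0) - (if (i:Int) = r2+1 then 1 else 0)) *
    ((if (j:Int) = c1 then 1 else 0) - (if (j:Int) = c2+1 then 1 else 0))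
  | _ => 0

-- contribution of one skill row to cell (i, j) in B's direct scan
def contrib (s : List Int) (i j : Nat) : Int :=
  match s with
  | [t, r1, c1, r2, c2, d] =>
    if r1 ≤ (i:Int) ∧ (i:Int) ≤ r2 ∧ c1 ≤ (j:Int) ∧ (j:Int) ≤ c2 then
      (if t = 1 then -d else if t = 2 then d else 0)
    else 0
  | _ => 0

-- the per-row condition Pre_solution imposes
def Good (n m : Nat) (s : List Int) : Prop :=
  s.length = 6 ∧
  ((s.getD 0 0 = 1 ∨ s.getD 0 0 = 2) →
    0 ≤ s.getD 1 0 ∧ s.getD 1 0 ≤ s.getD 3 0 ∧ s.getD 3 0 < (n : Int) ∧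
    0 ≤ s.getD 2 0 ∧ s.getD 2 0 ≤ s.getD 4 0 ∧ s.getD 4 0 < (m : Int))

-- basic grid lemmas -------------------------------------------------------

lemma length_pyModAt {α : Type} (xs : List α) (i : Int) (f : α → α) :
    (pyModAt xs i f).length = xs.length := by
  simp only [pyModAt]
  split_ifs <;> simp

lemma getD_pyModAt {α : Type} (xs : List α) (a : Int) (f : α → α)
    (h0 : 0 ≤ a) (ha : a < xs.length) (j : Nat) (d : α) :
    (pyModAt xs a f).getD j d = if (j:Int) = a then f (xs.getD j d) else xs.getD j d := by
  have hne : ¬ a < 0 := not_lt.mpr h0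
  simp only [pyModAt, hne, if_false, if_pos (And.intro h0 ha)]
  rcases eq_or_ne (j:Int) a with he | he
  · have hj : j < xs.length := by omega
    have hat : a.toNat = j := by omega
    simp [List.getD_eq_getElem?_getD, List.getElem?_modify, hat, he,
      List.getElem?_eq_getElem hj]
  · have hat : a.toNat ≠ j := by omega
    simp [List.getD_eq_getElem?_getD, List.getElem?_modify, hat, he]

lemma shape_upd2 {n m : Nat} {C : List (List Int)} (hs : Shape n m C) {a : Int}
    (ha0 : 0 ≤ a) (ha : a < (n:Int)) (b : Int) (f : Int → Int) :
    Shape n m (upd2 C a b f) := by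
  obtain ⟨h1, h2⟩ := hs
  have haC : a < (C.length : Int) := by omega
  refine ⟨by simp [upd2, length_pyModAt, h1], ?_⟩
  intro i hi
  unfold upd2
  rw [getD_pyModAt C a _ ha0 haC i []]
  rcases eq_or_ne (i:Int) a with he | he
  · rw [if_pos he, length_pyModAt]; exact h2 i hi
  · rw [if_neg he]; exact h2 i hi

lemma g_upd2 {n m : Nat} {C : List (List Int)} (hs : Shape n m C) {a b : Int}
    (ha0 : 0 ≤ a) (ha : a < (n:Int)) (hb0 : 0 ≤ b) (hb : b < (m:Int))
    (f : Int → Int) (i j : Nat) :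
    g (upd2 C a b f) i j =
      if (i:Int) = a ∧ (j:Int) = b then f (g C i j) else g C i j := by
  obtain ⟨h1, h2⟩ := hs
  have haC : a < (C.length : Int) := by omega
  unfold g upd2
  rw [getD_pyModAt C a _ ha0 haC i []]
  rcases eq_or_ne (i:Int) a with he | he
  · have hi : i < C.length := by omega
    have hin : i < n := by omega
    have hrowlen : (C.getD i []).length = m := h2 i hin
    have hbC : b < ((C.getD i []).length : Int) := by rw [hrowlen]; exact hb
    rw [if_pos he, getD_pyModAt _ b _ hb0 hbC j 0]
    simp [he]
  · simp [he]

-- the raw difference array after the skill loop ---------------------------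

lemma applySkill_g {n m : Nat} {C : List (List Int)} (hs : Shape (n+1) (m+1) C)
    {s : List Int} (hg : Good n m s) :
    Shape (n+1) (m+1) (applySkill C s) ∧
      ∀ i j : Nat, g (applySkill C s) i j = g C i j + cornerS s i j := by
  obtain ⟨hlen, hbnd⟩ := hg
  rcases s with _ | ⟨t, s⟩; · simp at hlen
  rcases s with _ | ⟨r1, s⟩; · simp at hlen
  rcases s with _ | ⟨c1, s⟩; · simp at hlen
  rcases s with _ | ⟨r2, s⟩; · simp at hlen
  rcases s with _ | ⟨c2, s⟩; · simp at hlen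
  rcases s with _ | ⟨d, s⟩; · simp at hlen
  rcases s with _ | ⟨e, s⟩; swap; · simp at hlen
  simp only [List.getD_cons_zero, List.getD_cons_succ] at hbnd
  by_cases ht1 : t = 1
  · obtain ⟨hr10, hr12, hr2n, hc10, hc12, hc2m⟩ := hbnd (by simp [ht1])
    have har1 : r1 < ((n+1 : Nat) : Int) := by push_cast; omega
    have har2 : 0 ≤ r2 + 1 ∧ r2 + 1 < ((n+1 : Nat) : Int) := by push_cast; omega
    have hac1 : c1 < ((m+1 : Nat) : Int) := by push_cast; omega
    have hac2 : 0 ≤ c2 + 1 ∧ c2 + 1 < ((m+1 : Nat) : Int) := by push_cast; omega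
    have s1 := shape_upd2 hs hr10 har1 c1 (· - d)
    have s2 := shape_upd2 s1 har2.1 har2.2 (c2+1) (· - d)
    have s3 := shape_upd2 s2 hr10 har1 (c2+1) (· + d)
    have s4 := shape_upd2 s3 har2.1 har2.2 c1 (· + d)
    refine ⟨by simpa [applySkill, ht1] using s4, ?_⟩
    intro i j
    simp only [applySkill, ht1, if_pos]
    rw [g_upd2 s3 har2.1 har2.2 hc10 hac1,
        g_upd2 s2 hr10 har1 hac2.1 hac2.2,
        g_upd2 s1 har2.1 har2.2 hac2.1 hac2.2,
        g_upd2 hs hr10 har1 hc10 hac1]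
    simp only [cornerS, ht1, if_pos]
    by_cases h1 : (i:Int) = r1 <;> by_cases h2 : (i:Int) = r2+1 <;>
      by_cases h3 : (j:Int) = c1 <;> by_cases h4 : (j:Int) = c2+1 <;>
      first
        | omega
        | (simp only [h1, h2, h3, h4, if_true, if_false, and_true, true_and,
             and_false, false_and, if_pos, if_neg, not_false_iff]
           first | ring1 | (split_ifs <;> (first | ring1 | omega)))
  · by_cases ht2 : t = 2
    · obtain ⟨hr10, hr12, hr2n, hc10, hc12, hc2m⟩ := hbnd (by simp [ht2])
      have har1 : r1 < ((n+1 : Nat) : Int) := by push_cast; omega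
      have har2 : 0 ≤ r2 + 1 ∧ r2 + 1 < ((n+1 : Nat) : Int) := by push_cast; omega
      have hac1 : c1 < ((m+1 : Nat) : Int) := by push_cast; omega
      have hac2 : 0 ≤ c2 + 1 ∧ c2 + 1 < ((m+1 : Nat) : Int) := by push_cast; omega
      have s1 := shape_upd2 hs hr10 har1 c1 (· + d)
      have s2 := shape_upd2 s1 har2.1 har2.2 (c2+1) (· + d)
      have s3 := shape_upd2 s2 hr10 har1 (c2+1) (· - d)
      have s4 := shape_upd2 s3 har2.1 har2.2 c1 (· - d)
      refine ⟨by simpa [applySkill, ht1, ht2] using s4, ?_⟩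
      intro i j
      simp only [applySkill]
      rw [if_neg ht1, if_pos ht2]
      rw [g_upd2 s3 har2.1 har2.2 hc10 hac1,
          g_upd2 s2 hr10 har1 hac2.1 hac2.2,
          g_upd2 s1 har2.1 har2.2 hac2.1 hac2.2,
          g_upd2 hs hr10 har1 hc10 hac1]
      simp only [cornerS]
      rw [if_neg ht1, if_pos ht2]
      by_cases h1 : (i:Int) = r1 <;> by_cases h2 : (i:Int) = r2+1 <;>
        by_cases h3 : (j:Int) = c1 <;> by_cases h4 : (j:Int) = c2+1 <;>
        first
          | omega
          | (simp only [h1, h2, h3, h4, if_true, if_false, and_true, true_and,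
               and_false, false_and, if_pos, if_neg, not_false_iff]
             first | ring1 | (split_ifs <;> (first | ring1 | omega)))
    · refine ⟨by simpa [applySkill, ht1, ht2] using hs, ?_⟩
      intro i j
      simp [applySkill, cornerS, ht1, ht2]

-- the initial all-zero grid --------------------------------------------------

lemma g_zero (n m : Nat) (i j : Nat) :
    g (List.replicate n (List.replicate m (0:Int))) i j = 0 := by
  unfold g
  simp [List.getD_eq_getElem?_getD, List.getElem?_replicate]
  split_ifs <;> simp

-- horizontal prefix pass ------------------------------------------------------

lemma hrow {n m : Nat} (i : Nat) (hi : i < n) :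
    ∀ (k : Nat), k ≤ m - 1 → ∀ {C : List (List Int)}, Shape (n+1) (m+1) C →
      Shape (n+1) (m+1) ((List.range' 1 k).foldl
        (fun C (j : Nat) => upd2 C (i:Int) (j:Int) (fun x => x + g C i (j-1))) C) ∧
      ∀ i' j' : Nat, g ((List.range' 1 k).foldl
          (fun C (j : Nat) => upd2 C (i:Int) (j:Int) (fun x => x + g C i (j-1))) C) i' j'
        = if i' = i ∧ j' ≤ k then ∑ x ∈ Finset.range (j'+1), g C i x else g C i' j' := by
  intro k
  induction k with
  | zero =>
    intro _ C hs
    refine ⟨hs, ?_⟩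
    intro i' j'
    split_ifs with h
    · obtain ⟨rfl, hj⟩ := h
      have : j' = 0 := Nat.le_zero.mp hj
      subst this
      simp [Finset.sum_range_one]
    · rfl
  | succ k ih =>
    intro hk C hs
    obtain ⟨ihs, ihv⟩ := ih (by omega) hs
    rw [List.range'_1_concat, List.foldl_append]
    simp only [List.foldl_cons, List.foldl_nil]
    have hknat : (1+k) - 1 = k := by omega
    have hi0 : (0:Int) ≤ (i:Int) := Int.natCast_nonneg i
    have hiN : (i:Int) < ((n+1 : Nat) : Int) := by exact_mod_cast Nat.lt_succ_of_lt hi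
    have hj0 : (0:Int) ≤ ((1+k : Nat) : Int) := Int.natCast_nonneg _
    have hjM : ((1+k : Nat) : Int) < ((m+1 : Nat) : Int) := by
      have : 1 + k < m + 1 := by omega
      exact_mod_cast this
    refine ⟨shape_upd2 ihs hi0 hiN _ _, ?_⟩
    intro i' j'
    rw [g_upd2 ihs hi0 hiN hj0 hjM]
    rw [hknat]
    have hcast : ((i':Int) = (i:Int) ∧ (j':Int) = ((1+k : Nat) : Int)) ↔ (i' = i ∧ j' = 1+k) := by
      constructor <;> intro h <;> exact ⟨by exact_mod_cast h.1, by exact_mod_cast h.2⟩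
    rw [if_congr hcast rfl rfl]
    by_cases hii : i' = i
    · subst hii
      by_cases hjj : j' = 1 + k
      · subst hjj
        rw [if_pos ⟨rfl, rfl⟩, if_pos ⟨rfl, by omega⟩]
        rw [ihv i' (1+k), ihv i' k]
        rw [if_neg (by omega), if_pos ⟨rfl, le_rfl⟩]
        conv_rhs => rw [show 1+k+1 = (k+1)+1 by omega, Finset.sum_range_succ]
        rw [show 1+k = k+1 by omega]
        ring
      · rw [if_neg (by simp [hjj]), ihv i' j']
        by_cases hle : j' ≤ k
        · rw [if_pos ⟨rfl, hle⟩, if_pos ⟨rfl, by omega⟩]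
        · rw [if_neg (by simp [hle]), if_neg (by intro h; exact absurd h.2 (by omega))]
    · rw [if_neg (by simp [hii]), ihv i' j', if_neg (by simp [hii]), if_neg (by simp [hii])]

lemma hphase {n m : Nat} :
    ∀ (k : Nat), k ≤ n → ∀ {C : List (List Int)}, Shape (n+1) (m+1) C →
      Shape (n+1) (m+1) ((List.range k).foldl (fun C (i : Nat) =>
        (List.range' 1 (m-1)).foldl
          (fun C (j : Nat) => upd2 C (i:Int) (j:Int) (fun x => x + g C i (j-1))) C) C) ∧
      ∀ i' j' : Nat, g ((List.range k).foldl (fun C (i : Nat) =>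
          (List.range' 1 (m-1)).foldl
            (fun C (j : Nat) => upd2 C (i:Int) (j:Int) (fun x => x + g C i (j-1))) C) C) i' j'
        = if i' < k ∧ j' ≤ m - 1 then ∑ x ∈ Finset.range (j'+1), g C i' x else g C i' j' := by
  intro k
  induction k with
  | zero =>
    intro _ C hs
    refine ⟨hs, ?_⟩
    intro i' j'
    rw [if_neg (by omega)]
    rfl
  | succ k ih =>
    intro hk C hs
    obtain ⟨ihs, ihv⟩ := ih (by omega) hs
    rw [List.range_succ, List.foldl_append]
    simp only [List.foldl_cons, List.foldl_nil]
    obtain ⟨rs, rv⟩ := hrow k (by omega) (m-1) le_rfl ihs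
    refine ⟨rs, ?_⟩
    intro i' j'
    rw [rv i' j']
    by_cases hii : i' = k
    · subst hii
      by_cases hjj : j' ≤ m - 1
      · rw [if_pos ⟨rfl, hjj⟩, if_pos ⟨by omega, hjj⟩]
        refine Finset.sum_congr rfl ?_
        intro x _
        rw [ihv i' x, if_neg (by omega)]
      · rw [if_neg (by simp [hjj]), ihv i' j', if_neg (by omega), if_neg (by simp [hjj])]
    · rw [if_neg (by simp [hii]), ihv i' j']
      by_cases hlt : i' < k
      · by_cases hjm : j' ≤ m - 1
        · rw [if_pos ⟨hlt, hjm⟩, if_pos ⟨by omega, hjm⟩]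
        · rw [if_neg (by simp [hjm]), if_neg (by simp [hjm])]
      · rw [if_neg (by simp [hlt]), if_neg (by omega)]

-- vertical prefix pass --------------------------------------------------------

lemma vrow {n m : Nat} (i : Nat) (h1i : 1 ≤ i) (hi : i < n) :
    ∀ (k : Nat), k ≤ m → ∀ {C : List (List Int)}, Shape (n+1) (m+1) C →
      Shape (n+1) (m+1) ((List.range k).foldl
        (fun C (j : Nat) => upd2 C (i:Int) (j:Int) (fun x => x + g C (i-1) j)) C) ∧
      ∀ i' j' : Nat, g ((List.range k).foldl
          (fun C (j : Nat) => upd2 C (i:Int) (j:Int) (fun x => x + g C (i-1) j)) C) i' j'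
        = if i' = i ∧ j' < k then g C i j' + g C (i-1) j' else g C i' j' := by
  intro k
  induction k with
  | zero =>
    intro _ C hs
    refine ⟨hs, ?_⟩
    intro i' j'
    rw [if_neg (by omega)]
    rfl
  | succ k ih =>
    intro hk C hs
    obtain ⟨ihs, ihv⟩ := ih (by omega) hs
    rw [List.range_succ, List.foldl_append]
    simp only [List.foldl_cons, List.foldl_nil]
    have hi0 : (0:Int) ≤ (i:Int) := Int.natCast_nonneg i
    have hiN : (i:Int) < ((n+1 : Nat) : Int) := by exact_mod_cast Nat.lt_succ_of_lt hi
    have hj0 : (0:Int) ≤ ((k : Nat) : Int) := Int.natCast_nonneg _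
    have hjM : ((k : Nat) : Int) < ((m+1 : Nat) : Int) := by
      have : k < m + 1 := by omega
      exact_mod_cast this
    refine ⟨shape_upd2 ihs hi0 hiN _ _, ?_⟩
    intro i' j'
    rw [g_upd2 ihs hi0 hiN hj0 hjM]
    have hcast : ((i':Int) = (i:Int) ∧ (j':Int) = ((k : Nat) : Int)) ↔ (i' = i ∧ j' = k) := by
      constructor <;> intro h <;> exact ⟨by exact_mod_cast h.1, by exact_mod_cast h.2⟩
    rw [if_congr hcast rfl rfl]
    by_cases hii : i' = i
    · subst hii
      by_cases hjj : j' = k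
      · subst hjj
        rw [if_pos ⟨rfl, rfl⟩, if_pos ⟨rfl, by omega⟩]
        rw [ihv i' j', ihv (i'-1) j']
        rw [if_neg (by omega), if_neg (by omega)]
      · rw [if_neg (by simp [hjj]), ihv i' j']
        by_cases hlt : j' < k
        · rw [if_pos ⟨rfl, hlt⟩, if_pos ⟨rfl, by omega⟩]
        · rw [if_neg (by simp [hlt]), if_neg (by intro h; exact absurd h.2 (by omega))]
    · rw [if_neg (by simp [hii]), ihv i' j', if_neg (by simp [hii]), if_neg (by simp [hii])]

lemma vphase {n m : Nat} :
    ∀ (k : Nat), k ≤ n - 1 → ∀ {C : List (List Int)}, Shape (n+1) (m+1) C →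
      Shape (n+1) (m+1) ((List.range' 1 k).foldl (fun C (i : Nat) =>
        (List.range m).foldl
          (fun C (j : Nat) => upd2 C (i:Int) (j:Int) (fun x => x + g C (i-1) j)) C) C) ∧
      ∀ i' j' : Nat, g ((List.range' 1 k).foldl (fun C (i : Nat) =>
          (List.range m).foldl
            (fun C (j : Nat) => upd2 C (i:Int) (j:Int) (fun x => x + g C (i-1) j)) C) C) i' j'
        = if i' ≤ k ∧ j' < m then ∑ x ∈ Finset.range (i'+1), g C x j' else g C i' j' := by
  intro k
  induction k with
  | zero =>
    intro _ C hs
    refine ⟨hs, ?_⟩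
    intro i' j'
    split_ifs with h
    · obtain ⟨hi0, hj⟩ := h
      have : i' = 0 := Nat.le_zero.mp hi0
      subst this
      simp [Finset.sum_range_one]
    · rfl
  | succ k ih =>
    intro hk C hs
    obtain ⟨ihs, ihv⟩ := ih (by omega) hs
    rw [List.range'_1_concat, List.foldl_append]
    simp only [List.foldl_cons, List.foldl_nil]
    obtain ⟨rs, rv⟩ := vrow (1+k) (by omega) (by omega) m le_rfl ihs
    refine ⟨rs, ?_⟩
    intro i' j'
    rw [rv i' j']
    by_cases hii : i' = 1+k
    · subst hii
      by_cases hjj : j' < m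
      · rw [if_pos ⟨rfl, hjj⟩, if_pos ⟨by omega, hjj⟩]
        rw [show 1+k-1 = k by omega]
        rw [ihv (1+k) j', ihv k j']
        rw [if_neg (by omega), if_pos ⟨le_rfl, hjj⟩]
        conv_rhs => rw [show 1+k+1 = (k+1)+1 by omega, Finset.sum_range_succ]
        rw [show 1+k = k+1 by omega]
        ring
      · rw [if_neg (by simp [hjj]), ihv (1+k) j', if_neg (by simp [hjj]), if_neg (by simp [hjj])]
    · rw [if_neg (by simp [hii]), ihv i' j']
      by_cases hle : i' ≤ k
      · by_cases hjj : j' < m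
        · rw [if_pos ⟨hle, hjj⟩, if_pos ⟨by omega, hjj⟩]
        · rw [if_neg (by simp [hjj]), if_neg (by simp [hjj])]
      · rw [if_neg (by simp [hle]), if_neg (by omega)]

lemma foldl_applySkill {n m : Nat} (L : List (List Int))
    (hL : ∀ s ∈ L, Good n m s) :
    ∀ {C : List (List Int)}, Shape (n+1) (m+1) C →
      Shape (n+1) (m+1) (L.foldl applySkill C) ∧
        ∀ i j : Nat, g (L.foldl applySkill C) i j
          = g C i j + (L.map (fun s => cornerS s i j)).sum := by
  induction L with
  | nil => intro C hs; simpa using hs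
  | cons s L ih =>
    intro C hs
    have hgood := hL s (List.mem_cons_self ..)
    obtain ⟨hs', hval⟩ := applySkill_g hs hgood
    obtain ⟨hsf, hvf⟩ := ih (fun x hx => hL x (List.mem_cons_of_mem _ hx)) hs'
    refine ⟨by simpa using hsf, ?_⟩
    intro i j
    simp only [List.foldl_cons, List.map_cons, List.sum_cons]
    rw [hvf i j, hval i j]; ring

-- indicator sums and the telescoping identity ---------------------------------

lemma ind_sum (a : Int) (i : Nat) :
    ∑ x ∈ Finset.range (i+1), (if (x:Int) = a then (1:Int) else 0)
      = if 0 ≤ a ∧ a ≤ (i:Int) then 1 else 0 := by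
  induction i with
  | zero =>
    rw [Finset.sum_range_one]
    split_ifs <;> omega
  | succ i ih =>
    rw [Finset.sum_range_succ, ih]
    push_cast
    split_ifs <;> omega

lemma corner_box {n m : Nat} {s : List Int} (hg : Good n m s) (i j : Nat) :
    ∑ x ∈ Finset.range (i+1), ∑ y ∈ Finset.range (j+1), cornerS s x y = contrib s i j := by
  obtain ⟨hlen, hbnd⟩ := hg
  rcases s with _ | ⟨t, s⟩; · simp at hlen
  rcases s with _ | ⟨r1, s⟩; · simp at hlen
  rcases s with _ | ⟨c1, s⟩; · simp at hlen
  rcases s with _ | ⟨r2, s⟩; · simp at hlen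
  rcases s with _ | ⟨c2, s⟩; · simp at hlen
  rcases s with _ | ⟨d, s⟩; · simp at hlen
  rcases s with _ | ⟨e, s⟩; swap; · simp at hlen
  simp only [List.getD_cons_zero, List.getD_cons_succ] at hbnd
  simp only [cornerS, contrib]
  have key : ∀ (A : Int),
      ∑ x ∈ Finset.range (i+1), ∑ y ∈ Finset.range (j+1),
        A * ((if (x:Int) = r1 then (1:Int) else 0) - (if (x:Int) = r2+1 then 1 else 0))
          * ((if (y:Int) = c1 then (1:Int) else 0) - (if (y:Int) = c2+1 then 1 else 0))
      = A * ((if 0 ≤ r1 ∧ r1 ≤ (i:Int) then 1 else 0) - (if 0 ≤ r2+1 ∧ r2+1 ≤ (i:Int) then 1 else 0))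
          * ((if 0 ≤ c1 ∧ c1 ≤ (j:Int) then 1 else 0) - (if 0 ≤ c2+1 ∧ c2+1 ≤ (j:Int) then 1 else 0)) := by
    intro A
    rw [← ind_sum r1 i, ← ind_sum (r2+1) i, ← ind_sum c1 j, ← ind_sum (c2+1) j]
    rw [← Finset.sum_sub_distrib, ← Finset.sum_sub_distrib]
    rw [mul_assoc, Finset.sum_mul_sum, Finset.mul_sum]
    refine Finset.sum_congr rfl (fun x _ => ?_)
    rw [Finset.mul_sum]
    refine Finset.sum_congr rfl (fun y _ => by ring)
  rw [key]
  by_cases ht1 : t = 1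
  · obtain ⟨hr10, hr12, hr2n, hc10, hc12, hc2m⟩ := hbnd (by simp [ht1])
    rw [if_pos ht1]
    split_ifs <;> (first | ring1 | omega)
  · by_cases ht2 : t = 2
    · obtain ⟨hr10, hr12, hr2n, hc10, hc12, hc2m⟩ := hbnd (by simp [ht2])
      rw [if_neg ht1, if_pos ht2]
      split_ifs <;> (first | ring1 | omega)
    · rw [if_neg ht1, if_neg ht2]
      split_ifs <;> ring1

lemma sum_box_map (L : List (List Int)) (i j : Nat) :
    ∑ x ∈ Finset.range (i+1), ∑ y ∈ Finset.range (j+1), (L.map (fun s => cornerS s x y)).sum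
      = (L.map (fun s => ∑ x ∈ Finset.range (i+1), ∑ y ∈ Finset.range (j+1), cornerS s x y)).sum := by
  induction L with
  | nil => simp
  | cons s L ih =>
    simp only [List.map_cons, List.sum_cons, Finset.sum_add_distrib, ih]

-- B's inner fold ---------------------------------------------------------------

lemma skillStep_eq (i j : Nat) (h : Int) (s : List Int) :
    skillStep i j h s = h + contrib s i j := by
  rcases s with _ | ⟨t, s⟩; · simp [skillStep, contrib]
  rcases s with _ | ⟨r1, s⟩; · simp [skillStep, contrib]
  rcases s with _ | ⟨c1, s⟩; · simp [skillStep, contrib]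
  rcases s with _ | ⟨r2, s⟩; · simp [skillStep, contrib]
  rcases s with _ | ⟨c2, s⟩; · simp [skillStep, contrib]
  rcases s with _ | ⟨d, s⟩; · simp [skillStep, contrib]
  rcases s with _ | ⟨e, s⟩; swap; · simp [skillStep, contrib]
  simp only [skillStep, contrib]
  split_ifs <;> ring

lemma foldl_skillStep (L : List (List Int)) (i j : Nat) :
    ∀ h0 : Int, L.foldl (skillStep i j) h0 = h0 + (L.map (fun s => contrib s i j)).sum := by
  induction L with
  | nil => intro h0; simp
  | cons s L ih =>
    intro h0
    simp only [List.foldl_cons, List.map_cons, List.sum_cons, skillStep_eq]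
    rw [ih]
    ring

-- the two counting loops ------------------------------------------------------

lemma count_eq (n m : Nat) (board D : List (List Int)) (skill : List (List Int))
    (hval : ∀ i, i < n → ∀ j, j < m →
      g board i j + g D i j = skill.foldl (skillStep i j) ((board.getD i []).getD j 0)) :
    (List.range n).foldl (fun a i => (List.range m).foldl
        (fun a j => if g board i j + g D i j > 0 then a + 1 else a) a) 0
      = (List.range n).foldl (fun a i => (List.range m).foldl
        (fun a j => if skill.foldl (skillStep i j) ((board.getD i []).getD j 0) > 0 then a + 1 else a) a) (0:Int) := by
  refine PySem.List.foldl_congr_mem _ _ _ _ ?_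
  intro acc i hi
  refine PySem.List.foldl_congr_mem _ _ _ _ ?_
  intro acc' j hj
  rw [hval i (List.mem_range.mp hi) j (List.mem_range.mp hj)]

-- ===== VERDICT (by name: the statement is the Claim_ definition above) =====

theorem solution_spec : Claim_equal_solution := by
  intro board skill _ hpre
  obtain ⟨hne, hrows, hsk⟩ := hpre
  unfold Spec_solution
  simp only [solution, solution_alt]
  set n := board.length with hn
  set m := (board.headD []).length with hm
  have hn0 : 0 < n := by
    cases board with
    | nil => exact absurd rfl hne
    | cons a l => simp [hn]
  have shape0 : Shape (n+1) (m+1) (List.replicate (n+1) (List.replicate (m+1) (0:Int))) := by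
    refine ⟨by simp, ?_⟩
    intro i hi
    rw [List.getD_eq_getElem?_getD, List.getElem?_replicate, if_pos hi]
    simp
  have hgood : ∀ s ∈ skill, Good n m s := hsk
  obtain ⟨sh1, v1⟩ := foldl_applySkill (n := n) (m := m) skill hgood shape0
  obtain ⟨sh2, v2⟩ := hphase (n := n) (m := m) n le_rfl sh1
  obtain ⟨sh3, v3⟩ := vphase (n := n) (m := m) (n-1) le_rfl sh2
  refine count_eq n m board _ skill ?_
  intro i hi j hj
  rw [foldl_skillStep]
  have h3 := v3 i j
  rw [if_pos ⟨by omega, hj⟩] at h3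
  rw [h3]
  have hsum : (∑ x ∈ Finset.range (i+1), ∑ y ∈ Finset.range (j+1),
        (skill.map (fun s => cornerS s x y)).sum)
      = (skill.map (fun s => contrib s i j)).sum := by
    rw [sum_box_map]
    exact congrArg List.sum (List.map_congr_left (fun s hs => corner_box (hgood s hs) i j))
  calc g board i j + ∑ x ∈ Finset.range (i+1), g _ x j
      = g board i j + ∑ x ∈ Finset.range (i+1), ∑ y ∈ Finset.range (j+1),
          (skill.map (fun s => cornerS s x y)).sum := by
        congr 1
        refine Finset.sum_congr rfl (fun x hx => ?_)
        have hxi : x ≤ i := by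
          have := Finset.mem_range.mp hx; omega
        have h2 := v2 x j
        rw [if_pos ⟨by omega, by omega⟩] at h2
        rw [h2]
        refine Finset.sum_congr rfl (fun y _ => ?_)
        rw [v1 x y, g_zero, zero_add]
    _ = g board i j + (skill.map (fun s => contrib s i j)).sum := by rw [hsum]
    _ = (board.getD i []).getD j 0 + (skill.map (fun s => contrib s i j)).sum := rfl
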